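-- pv_equiv track=rewrite | github.com/derkalle4/python3-idotmatrix-client | utils/utils.py | get_weather_category
-- ===== SOURCE A (Python) =====
-- def get_weather_category(condition_code,is_day):
--     weather_switch = {
--             "sun": [1000],
--             "partly cloudy": [1003],
--             "cloudy": [1006, 1009],
--             "fog": [1030, 1135, 1147],
--             "raining": [
--                 1063, 1150, 1153, 1180, 1183, 1186, 1189, 1192, 1195, 1240,
--                 1243, 1246, 1273, 1276
--                 ],
--             "snowing": [
--                 1066, 1114, 1117, 1168, 1171, 1204, 1207, 1210, 1213, 1216,
--                 1219, 1222, 1225, 1255, 1258, 1279, 1282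
--                 ],
--             "thundering": [1087, 1273, 1276, 1279, 1282],
--             "windy": [1114, 1117]
--             }
--     if is_day == 0:
--         # If it is night , we change the category
--         weather_switch["moon"] = weather_switch.pop("sun", [1000])
--         weather_switch["partly cloudy night"] = weather_switch.pop("partly cloudy", [1003])
--
--     for category, codes in weather_switch.items():
--         if condition_code in codes:
--             return category
--     return "unknown"
-- ===== SOURCE B (Python) =====
-- _CATEGORIES = [
--     ("sun", [1000]),
--     ("partly cloudy", [1003]),
--     ("cloudy", [1006, 1009]),
--     ("fog", [1030, 1135, 1147]),
--     ("raining", [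
--         1063, 1150, 1153, 1180, 1183, 1186, 1189, 1192, 1195, 1240,
--         1243, 1246, 1273, 1276
--         ]),
--     ("snowing", [
--         1066, 1114, 1117, 1168, 1171, 1204, 1207, 1210, 1213, 1216,
--         1219, 1222, 1225, 1255, 1258, 1279, 1282
--         ]),
--     ("thundering", [1087, 1273, 1276, 1279, 1282]),
--     ("windy", [1114, 1117]),
-- ]
--
-- # inverted index: code -> first (earliest) category that lists it
-- _CODE_TO_CAT = {}
-- for _cat, _codes in _CATEGORIES:
--     for _c in _codes:
--         _CODE_TO_CAT.setdefault(_c, _cat)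
--
-- _NIGHT_RENAME = {"sun": "moon", "partly cloudy": "partly cloudy night"}
--
--
-- def get_weather_category(condition_code, is_day):
--     category = _CODE_TO_CAT.get(condition_code, "unknown")
--     if is_day == 0:
--         category = _NIGHT_RENAME.get(category, category)
--     return category
-- ===== Notes on version B (the rewrite author's own statement) =====
-- stated objective: faster
-- what changed: Replaces the per-call category-by-category bucket scan (plus night-time dict pop/reinsert) with a module-level inverted code->category index built once keeping the first category per duplicated code, a single lookup with default 'unknown', and a tiny night rename table for 'sun' and 'partly cloudy'.
import Mathlib
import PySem

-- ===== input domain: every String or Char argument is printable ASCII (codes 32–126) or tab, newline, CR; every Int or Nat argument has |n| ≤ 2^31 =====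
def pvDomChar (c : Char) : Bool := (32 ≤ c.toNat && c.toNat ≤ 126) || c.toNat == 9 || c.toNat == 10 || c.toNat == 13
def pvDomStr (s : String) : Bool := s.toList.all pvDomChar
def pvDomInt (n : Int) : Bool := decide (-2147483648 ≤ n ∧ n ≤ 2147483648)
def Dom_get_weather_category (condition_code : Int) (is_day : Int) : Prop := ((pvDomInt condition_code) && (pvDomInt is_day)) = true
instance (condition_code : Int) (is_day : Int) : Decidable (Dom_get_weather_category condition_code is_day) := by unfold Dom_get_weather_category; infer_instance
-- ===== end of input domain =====

-- B replaces A's per-call category-bucket scan (with night-time dict pop/reinsert)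
-- by a prebuilt inverted code→category index (first category wins) plus a constant
-- night-rename table; equivalence of return values is proved for all Int inputs.

-- ===== PORT A =====
-- the for-loop over weather_switch.items(): first category whose code list contains the code
def wsLoop (c : Int) : List (String × List Int) → String
  | [] => "unknown"
  | (cat, codes) :: rest => if c ∈ codes then cat else wsLoop c rest

def wsBase : PySem.Dict String (List Int) := PySem.Dict.ofList
    [("sun", [1000]),
     ("partly cloudy", [1003]),
     ("cloudy", [1006, 1009]),
     ("fog", [1030, 1135, 1147]),
     ("raining", [1063, 1150, 1153, 1180, 1183, 1186, 1189, 1192, 1195, 1240,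
                  1243, 1246, 1273, 1276]),
     ("snowing", [1066, 1114, 1117, 1168, 1171, 1204, 1207, 1210, 1213, 1216,
                  1219, 1222, 1225, 1255, 1258, 1279, 1282]),
     ("thundering", [1087, 1273, 1276, 1279, 1282]),
     ("windy", [1114, 1117])]

def get_weather_category (condition_code : Int) (is_day : Int) : String :=
  let ws := wsBase
  let ws :=
    if is_day = 0 then
      -- d.pop(k, default) = lookup with default, then erase (exact for these present keys)
      let sunv := (ws.get? "sun").getD [1000]
      let ws := (ws.erase "sun").insert "moon" sunv
      let pcv := (ws.get? "partly cloudy").getD [1003]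
      (ws.erase "partly cloudy").insert "partly cloudy night" pcv
    else ws
  wsLoop condition_code ws.items

-- ===== PORT B =====
def altCategories : List (String × List Int) :=
  [("sun", [1000]),
   ("partly cloudy", [1003]),
   ("cloudy", [1006, 1009]),
   ("fog", [1030, 1135, 1147]),
   ("raining", [1063, 1150, 1153, 1180, 1183, 1186, 1189, 1192, 1195, 1240,
                1243, 1246, 1273, 1276]),
   ("snowing", [1066, 1114, 1117, 1168, 1171, 1204, 1207, 1210, 1213, 1216,
                1219, 1222, 1225, 1255, 1258, 1279, 1282]),
   ("thundering", [1087, 1273, 1276, 1279, 1282]),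
   ("windy", [1114, 1117])]

-- inverted index: code -> first (earliest) category that lists it (setdefault keeps the first)
def altIndex : PySem.Dict Int String :=
  altCategories.foldl (fun m p => p.2.foldl (fun m c => m.setdefault c p.1) m) PySem.Dict.empty

def altNight : PySem.Dict String String :=
  PySem.Dict.ofList [("sun", "moon"), ("partly cloudy", "partly cloudy night")]

def get_weather_category_alt (condition_code : Int) (is_day : Int) : String :=
  let category := altIndex.getD condition_code "unknown"
  if is_day = 0 then altNight.getD category category else category

-- ===== PRECONDITION & SPEC =====
def Spec_get_weather_category (condition_code : Int) (is_day : Int) (out : String) : Prop := out = get_weather_category_alt condition_code is_day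
instance (condition_code : Int) (is_day : Int) (out : String) : Decidable (Spec_get_weather_category condition_code is_day out) := by unfold Spec_get_weather_category; infer_instance

-- ===== CLAIM (what is proved, stated in full; the proofs are below) =====
def Claim_equal_get_weather_category : Prop := ∀ (condition_code : Int) (is_day : Int), Dom_get_weather_category condition_code is_day → Spec_get_weather_category condition_code is_day (get_weather_category condition_code is_day)

-- ===== LEMMAS AND PROOFS =====
-- every code that occurs anywhere in the table
def allCodes : List Int :=
  [1000, 1003, 1006, 1009, 1030, 1135, 1147,
   1063, 1150, 1153, 1180, 1183, 1186, 1189, 1192, 1195, 1240, 1243, 1246, 1273, 1276,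
   1066, 1114, 1117, 1168, 1171, 1204, 1207, 1210, 1213, 1216, 1219, 1222, 1225, 1255, 1258, 1279, 1282,
   1087]

-- the items lists the A-side loop actually traverses (day / night)
def dayPairs : List (String × List Int) :=
  [("sun", [1000]), ("partly cloudy", [1003]), ("cloudy", [1006, 1009]), ("fog", [1030, 1135, 1147]),
   ("raining", [1063, 1150, 1153, 1180, 1183, 1186, 1189, 1192, 1195, 1240, 1243, 1246, 1273, 1276]),
   ("snowing", [1066, 1114, 1117, 1168, 1171, 1204, 1207, 1210, 1213, 1216, 1219, 1222, 1225, 1255, 1258, 1279, 1282]),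
   ("thundering", [1087, 1273, 1276, 1279, 1282]), ("windy", [1114, 1117])]

def nightPairs : List (String × List Int) :=
  [("cloudy", [1006, 1009]), ("fog", [1030, 1135, 1147]),
   ("raining", [1063, 1150, 1153, 1180, 1183, 1186, 1189, 1192, 1195, 1240, 1243, 1246, 1273, 1276]),
   ("snowing", [1066, 1114, 1117, 1168, 1171, 1204, 1207, 1210, 1213, 1216, 1219, 1222, 1225, 1255, 1258, 1279, 1282]),
   ("thundering", [1087, 1273, 1276, 1279, 1282]), ("windy", [1114, 1117]),
   ("moon", [1000]), ("partly cloudy night", [1003])]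

set_option maxRecDepth 8192 in
lemma A_day (c d : Int) (hd : d ≠ 0) : get_weather_category c d = wsLoop c dayPairs := by
  simp only [get_weather_category, if_neg hd]
  rw [show wsBase.items = dayPairs from by decide]

set_option maxRecDepth 8192 in
lemma A_night (c : Int) : get_weather_category c 0 = wsLoop c nightPairs := by
  simp only [get_weather_category]
  congr 1

set_option maxRecDepth 8192 in
lemma altIndex_eq : altIndex = PySem.Dict.mk [(1000, "sun"), (1003, "partly cloudy"), (1006, "cloudy"), (1009, "cloudy"), (1030, "fog"), (1135, "fog"), (1147, "fog"), (1063, "raining"), (1150, "raining"), (1153, "raining"), (1180, "raining"), (1183, "raining"), (1186, "raining"), (1189, "raining"), (1192, "raining"), (1195, "raining"), (1240, "raining"), (1243, "raining"), (1246, "raining"), (1273, "raining"), (1276, "raining"), (1066, "snowing"), (1114, "snowing"), (1117, "snowing"), (1168, "snowing"), (1171, "snowing"), (1204, "snowing"), (1207, "snowing"), (1210, "snowing"), (1213, "snowing"), (1216, "snowing"), (1219, "snowing"), (1222, "snowing"), (1225, "snowing"), (1255, "snowing"), (1258, "snowing"), (1279, "snowing"), (1282, "snowing"), (1087, "thundering")]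 := by decide

set_option maxRecDepth 8192 in
lemma keys_altIndex : altIndex.keys = allCodes := by rw [altIndex_eq]; decide

lemma alt_unknown (c : Int) (h : c ∉ allCodes) :
    altIndex.getD c "unknown" = "unknown" := by
  apply PySem.Dict.getD_of_not_contains
  rw [PySem.Dict.contains_eq_decide_mem_keys, keys_altIndex]
  simpa using h

set_option maxRecDepth 8192 in
lemma mem_day : ∀ c ∈ allCodes, wsLoop c dayPairs = (PySem.Dict.mk [(1000, "sun"), (1003, "partly cloudy"), (1006, "cloudy"), (1009, "cloudy"), (1030, "fog"), (1135, "fog"), (1147, "fog"), (1063, "raining"), (1150, "raining"), (1153, "raining"), (1180, "raining"), (1183, "raining"), (1186, "raining"), (1189, "raining"), (1192, "raining"), (1195, "raining"), (1240, "raining"), (1243, "raining"), (1246, "raining"), (1273, "raining"), (1276, "raining"), (1066, "snowing"), (1114, "snowing"), (1117, "snowing"), (1168, "snowing"), (1171, "snowing"), (1204, "snowing"), (1207, "snowing"), (1210, "snowing"), (1213, "snowing"), (1216, "snowing"), (1219, "snowing"), (1222, "snowing"), (1225, "snowing"), (1255, "snowing"), (1258, "snowing"), (1279, "snowing"), (1282,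 "snowing"), (1087, "thundering")]).getD c "unknown" := by decide

set_option maxRecDepth 8192 in
lemma mem_night : ∀ c ∈ allCodes, wsLoop c nightPairs =
    altNight.getD ((PySem.Dict.mk [(1000, "sun"), (1003, "partly cloudy"), (1006, "cloudy"), (1009, "cloudy"), (1030, "fog"), (1135, "fog"), (1147, "fog"), (1063, "raining"), (1150, "raining"), (1153, "raining"), (1180, "raining"), (1183, "raining"), (1186, "raining"), (1189, "raining"), (1192, "raining"), (1195, "raining"), (1240, "raining"), (1243, "raining"), (1246, "raining"), (1273, "raining"), (1276, "raining"), (1066, "snowing"), (1114, "snowing"), (1117, "snowing"), (1168, "snowing"), (1171, "snowing"), (1204, "snowing"), (1207, "snowing"), (1210, "snowing"), (1213, "snowing"), (1216, "snowing"), (1219, "snowing"), (1222, "snowing"), (1225, "snowing"), (1255, "snowing"), (1258, "snowing"), (1279, "snowing"), (1282, "snowing"), (1087, "thundering")]).getD c "unknown") ((PySem.Dict.mk [(1000, "sun"), (1003, "partly cloudy"), (1006, "cloudy"), (1009, "cloudy"), (1030, "fog"), (1135, "fog"), (1147, "fog"), (1063, "raining"), (1150, "raining"), (1153, "raining"), (1180,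 "raining"), (1183, "raining"), (1186, "raining"), (1189, "raining"), (1192, "raining"), (1195, "raining"), (1240, "raining"), (1243, "raining"), (1246, "raining"), (1273, "raining"), (1276, "raining"), (1066, "snowing"), (1114, "snowing"), (1117, "snowing"), (1168, "snowing"), (1171, "snowing"), (1204, "snowing"), (1207, "snowing"), (1210, "snowing"), (1213, "snowing"), (1216, "snowing"), (1219, "snowing"), (1222, "snowing"), (1225, "snowing"), (1255, "snowing"), (1258, "snowing"), (1279, "snowing"), (1282, "snowing"), (1087, "thundering")]).getD c "unknown") := by decide

lemma main_mem (c : Int) (d : Int) (h : c ∈ allCodes) :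
    get_weather_category c d = get_weather_category_alt c d := by
  by_cases hd : d = 0
  · subst hd
    rw [A_night c]
    simp only [get_weather_category_alt, altIndex_eq]
    exact mem_night c h
  · rw [A_day c d hd]
    simp only [get_weather_category_alt, if_neg hd, altIndex_eq]
    exact mem_day c h

lemma main_not_mem (c : Int) (d : Int) (h : c ∉ allCodes) :
    get_weather_category c d = get_weather_category_alt c d := by
  have hne : ¬(c = 1000 ∨ c = 1003 ∨ c = 1006 ∨ c = 1009 ∨ c = 1030 ∨ c = 1135 ∨ c = 1147 ∨
      c = 1063 ∨ c = 1150 ∨ c = 1153 ∨ c = 1180 ∨ c = 1183 ∨ c = 1186 ∨ c = 1189 ∨ c = 1192 ∨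
      c = 1195 ∨ c = 1240 ∨ c = 1243 ∨ c = 1246 ∨ c = 1273 ∨ c = 1276 ∨ c = 1066 ∨ c = 1114 ∨
      c = 1117 ∨ c = 1168 ∨ c = 1171 ∨ c = 1204 ∨ c = 1207 ∨ c = 1210 ∨ c = 1213 ∨ c = 1216 ∨
      c = 1219 ∨ c = 1222 ∨ c = 1225 ∨ c = 1255 ∨ c = 1258 ∨ c = 1279 ∨ c = 1282 ∨ c = 1087) := by
    simpa [allCodes] using h
  have hu := alt_unknown c h
  by_cases hd : d = 0
  · subst hd
    rw [A_night c]
    simp only [get_weather_category_alt, hu]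
    simp only [wsLoop, nightPairs, List.mem_cons, List.not_mem_nil, or_false]
    split_ifs <;> first | rfl | (exfalso; omega)
  · rw [A_day c d hd]
    simp only [get_weather_category_alt, if_neg hd, hu]
    simp only [wsLoop, dayPairs, List.mem_cons, List.not_mem_nil, or_false]
    split_ifs <;> first | rfl | (exfalso; omega)

-- ===== VERDICT (by name: the statement is the Claim_ definition above) =====
theorem get_weather_category_spec : Claim_equal_get_weather_category := by
  intro c d _
  unfold Spec_get_weather_category
  by_cases h : c ∈ allCodes
  · exact main_mem c d h
  · exact main_not_mem c d h
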